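-- pv_equiv track=rewrite | github.com/znicholls/CMIP-branded-variable-mapper | src/cmip_branded_variable_mapper/mapper.py | _get_vertical_label
-- ===== SOURCE A (Python) =====
-- def _get_vertical_label(
--     label_options: dict[str, str], label_in: tuple[str, ...], default: str
-- ) -> str:
--     # sorts labels from longest to shortest
--     sorted_labels = sorted(label_options.items(), key=lambda x: len(x[0]), reverse=True)
--
--     for label, translation in sorted_labels:
--         if label in label_in:
--             # stops the loop as soon as a first match is found and returns match
--             return translation
--
--     # if no match is found, returns default
--     return default
-- ===== SOURCE B (Python) =====
-- def _get_vertical_label(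
--     label_options: dict[str, str], label_in: tuple[str, ...], default: str
-- ) -> str:
--     # single pass: track the translation of the longest matching label seen so far;
--     # strict > keeps the first (insertion-order) label among equal-length matches,
--     # which is exactly the stable-sort tie-break of the original.
--     label_set = set(label_in)
--     best = default
--     best_len = -1
--     for label, translation in label_options.items():
--         if len(label) > best_len and label in label_set:
--             best = translation
--             best_len = len(label)
--     return best
-- ===== Notes on version B (the rewrite author's own statement) =====
-- stated objective: alternative
-- what changed: Replaces sort-descending-then-scan-for-first-match with a single best-tracking pass over the options (strictly-greater length update so the first label wins ties), testing membership against a set built from label_in.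
import Mathlib
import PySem

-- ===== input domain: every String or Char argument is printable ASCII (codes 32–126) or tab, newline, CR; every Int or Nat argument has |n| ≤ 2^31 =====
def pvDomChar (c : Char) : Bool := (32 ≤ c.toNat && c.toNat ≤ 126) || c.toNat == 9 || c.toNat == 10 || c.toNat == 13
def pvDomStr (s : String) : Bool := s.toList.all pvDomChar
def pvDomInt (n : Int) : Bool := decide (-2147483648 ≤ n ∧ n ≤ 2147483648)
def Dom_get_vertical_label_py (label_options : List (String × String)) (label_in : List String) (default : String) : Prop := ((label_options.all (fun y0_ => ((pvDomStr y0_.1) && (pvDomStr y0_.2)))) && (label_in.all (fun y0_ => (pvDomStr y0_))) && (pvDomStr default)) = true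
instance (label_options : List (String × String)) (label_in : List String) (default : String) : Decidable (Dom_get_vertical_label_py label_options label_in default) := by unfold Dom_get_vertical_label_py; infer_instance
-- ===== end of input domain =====

-- B replaces A's sort-then-scan with a single best-tracking pass over the options (objective: alternative).


-- ===== PORT A =====
-- the 'for label, translation in sorted_labels: if label in label_in: return translation' loop
def pvFirstMatch (labels : List (String × String)) (label_in : List String) (default : String) : String :=
  match labels with
  | [] => default
  | (label, translation) :: rest =>
      if label_in.contains label then translation
      else pvFirstMatch rest label_in default

def get_vertical_label_py (label_options : List (String × String)) (label_in : List String) (default : String) : String :=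
  let sorted_labels := PySem.List.sorted label_options (fun x => PySem.Str.len x.1) true
  pvFirstMatch sorted_labels label_in default

-- ===== PORT B =====
def get_vertical_label_py_alt (label_options : List (String × String)) (label_in : List String) (default : String) : String :=
  let label_set : PySem.Set String := PySem.Set.ofList label_in
  (label_options.foldl
    (fun st p =>
      if decide (st.2 < PySem.Str.len p.1) && PySem.Set.contains label_set p.1 then (p.2, PySem.Str.len p.1) else st)
    (default, (-1 : Int))).1

-- ===== PRECONDITION & SPEC =====
def Spec_get_vertical_label_py (label_options : List (String × String)) (label_in : List String) (default : String) (out : String) : Prop := out = get_vertical_label_py_alt label_options label_in default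
instance (label_options : List (String × String)) (label_in : List String) (default : String) (out : String) : Decidable (Spec_get_vertical_label_py label_options label_in default out) := by unfold Spec_get_vertical_label_py; infer_instance

-- ===== CLAIM (what is proved, stated in full; the proofs are below) =====
def Claim_equal_get_vertical_label_py : Prop := ∀ (label_options : List (String × String)) (label_in : List String) (default : String), Dom_get_vertical_label_py label_options label_in default → Spec_get_vertical_label_py label_options label_in default (get_vertical_label_py label_options label_in default)

-- ===== LEMMAS AND PROOFS =====

theorem pvKey_nonneg (p : String × String) : (0 : Int) ≤ PySem.Str.len p.1 := by
  rw [PySem.Str.len_eq]; exact Int.natCast_nonneg _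

-- inserting into a key-descending list keeps it key-descending
theorem pvInsert_pairwise (x : String × String) (acc : List (String × String))
    (h : acc.Pairwise (fun a c => PySem.Str.len c.1 ≤ PySem.Str.len a.1)) :
    (PySem.List.insertBy (fun a b => decide (PySem.Str.len b.1 < PySem.Str.len a.1)) x acc).Pairwise
      (fun a c => PySem.Str.len c.1 ≤ PySem.Str.len a.1) := by
  induction acc with
  | nil => simp [PySem.List.insertBy]
  | cons y ys ih =>
    rw [List.pairwise_cons] at h
    by_cases hb : PySem.Str.len y.1 < PySem.Str.len x.1
    · simp only [PySem.List.insertBy, hb, decide_true, if_true]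
      refine List.Pairwise.cons ?_ (List.Pairwise.cons h.1 h.2)
      intro z hz
      rcases List.mem_cons.mp hz with rfl | hz
      · exact le_of_lt hb
      · exact le_trans (h.1 z hz) (le_of_lt hb)
    · simp only [PySem.List.insertBy, hb, decide_false, Bool.false_eq_true, if_false]
      refine List.Pairwise.cons ?_ (ih h.2)
      intro z hz
      rw [PySem.List.mem_insertBy] at hz
      rcases hz with rfl | hz
      · exact le_of_not_gt hb
      · exact h.1 z hz

-- the first match of 'insertBy x acc' for a key-descending acc whose matches are bounded by k
theorem pvFirstMatch_insert (label_in : List String) (default : String)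
    (x : String × String) (acc : List (String × String)) (k : Int)
    (hs : acc.Pairwise (fun a c => PySem.Str.len c.1 ≤ PySem.Str.len a.1))
    (hub : ∀ p ∈ acc, label_in.contains p.1 = true → PySem.Str.len p.1 ≤ k)
    (hex : k = -1 ∨ ∃ p ∈ acc, label_in.contains p.1 = true ∧ k ≤ PySem.Str.len p.1) :
    pvFirstMatch (PySem.List.insertBy (fun a b => decide (PySem.Str.len b.1 < PySem.Str.len a.1)) x acc) label_in default
      = if label_in.contains x.1 && decide (k < PySem.Str.len x.1) then x.2
        else pvFirstMatch acc label_in default := by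
  induction acc with
  | nil =>
    have hk : k = -1 := by
      rcases hex with h | ⟨p, hp, _⟩
      · exact h
      · simp at hp
    have hkx : k < PySem.Str.len x.1 := by
      have := pvKey_nonneg x; omega
    obtain ⟨x1, x2⟩ := x
    have hkx' : (decide (k < PySem.Str.len x1)) = true := decide_eq_true hkx
    by_cases hc : label_in.contains x1 = true <;>
      simp only [PySem.List.insertBy, pvFirstMatch, hc, hkx', Bool.and_true, if_true, if_false, Bool.false_eq_true]
  | cons y ys ih =>
    rw [List.pairwise_cons] at hs
    by_cases hb : PySem.Str.len y.1 < PySem.Str.len x.1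
    · simp only [PySem.List.insertBy, hb, decide_true, if_true]
      by_cases hc : label_in.contains x.1 = true
      · have hkx : k < PySem.Str.len x.1 := by
          rcases hex with rfl | ⟨p, hp, hcp, hkp⟩
          · have := pvKey_nonneg x; omega
          · rcases List.mem_cons.mp hp with rfl | hp
            · omega
            · have := hs.1 p hp; omega
        obtain ⟨x1, x2⟩ := x
        simp_all [pvFirstMatch]
      · obtain ⟨x1, x2⟩ := x
        simp_all [pvFirstMatch]
    · simp only [PySem.List.insertBy, hb, decide_false, Bool.false_eq_true, if_false]
      by_cases hcy : label_in.contains y.1 = true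
      · -- y matches, so key x ≤ key y ≤ k : the condition is false and y stays the first match
        have hyk : PySem.Str.len y.1 ≤ k := hub y (List.mem_cons_self) hcy
        have hxk : ¬ k < PySem.Str.len x.1 := by omega
        obtain ⟨y1, y2⟩ := y
        simp_all [pvFirstMatch]
      · -- y does not match: recurse into the tail
        have hrec := ih hs.2
          (fun p hp hc => hub p (List.mem_cons_of_mem _ hp) hc)
          (by
            rcases hex with h | ⟨p, hp, hc, hkp⟩
            · exact Or.inl h
            · rcases List.mem_cons.mp hp with rfl | hp
              · exact absurd hc hcy
              · exact Or.inr ⟨p, hp, hc, hkp⟩)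
        obtain ⟨y1, y2⟩ := y
        simp_all [pvFirstMatch]

-- loop invariant: folding the remaining options into the sorted accumulator and into B's state agree
theorem pvMain (label_in : List String) (default : String) :
    ∀ (xs acc : List (String × String)) (b : String) (k : Int),
      acc.Pairwise (fun a c => PySem.Str.len c.1 ≤ PySem.Str.len a.1) →
      pvFirstMatch acc label_in default = b →
      (∀ p ∈ acc, label_in.contains p.1 = true → PySem.Str.len p.1 ≤ k) →
      (k = -1 ∨ ∃ p ∈ acc, label_in.contains p.1 = true ∧ k ≤ PySem.Str.len p.1) →
      pvFirstMatch
        (xs.foldl (fun a x => PySem.List.insertBy (fun a b => decide (PySem.Str.len b.1 < PySem.Str.len a.1)) x a) acc)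
        label_in default
      = (xs.foldl
          (fun st p =>
            if label_in.contains p.1 && decide (st.2 < PySem.Str.len p.1) then (p.2, PySem.Str.len p.1) else st)
          (b, k)).1 := by
  intro xs
  induction xs with
  | nil => intro acc b k _ hfm _ _; simpa using hfm
  | cons x rest ih =>
    intro acc b k hs hfm hub hex
    simp only [List.foldl_cons]
    by_cases hcond : (label_in.contains x.1 && decide (k < PySem.Str.len x.1)) = true
    · rw [if_pos hcond]
      refine ih _ x.2 (PySem.Str.len x.1) (pvInsert_pairwise x acc hs) ?_ ?_ ?_
      · rw [pvFirstMatch_insert label_in default x acc k hs hub hex, if_pos hcond]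
      · intro p hp hc
        rw [PySem.List.mem_insertBy] at hp
        rcases hp with rfl | hp
        · exact le_refl _
        · have := hub p hp hc
          simp only [Bool.and_eq_true, decide_eq_true_eq] at hcond
          omega
      · refine Or.inr ⟨x, ?_, ?_, le_refl _⟩
        · rw [PySem.List.mem_insertBy]; exact Or.inl rfl
        · simp only [Bool.and_eq_true] at hcond; exact hcond.1
    · rw [if_neg hcond]
      refine ih _ b k (pvInsert_pairwise x acc hs) ?_ ?_ ?_
      · rw [pvFirstMatch_insert label_in default x acc k hs hub hex, if_neg hcond]; exact hfm
      · intro p hp hc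
        rw [PySem.List.mem_insertBy] at hp
        rcases hp with rfl | hp
        · simp only [Bool.and_eq_true, decide_eq_true_eq, not_and] at hcond
          have := hcond hc; omega
        · exact hub p hp hc
      · rcases hex with h | ⟨p, hp, hc, hkp⟩
        · exact Or.inl h
        · exact Or.inr ⟨p, by rw [PySem.List.mem_insertBy]; exact Or.inr hp, hc, hkp⟩

-- ===== VERDICT (by name: the statement is the Claim_ definition above) =====
theorem get_vertical_label_py_spec : Claim_equal_get_vertical_label_py := by
  intro label_options label_in default _
  show get_vertical_label_py label_options label_in default
      = get_vertical_label_py_alt label_options label_in default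
  unfold get_vertical_label_py get_vertical_label_py_alt
  rw [PySem.List.sorted_rev_eq_foldl_insertBy]
  have hf : (fun (st : String × Int) (p : String × String) =>
      if decide (st.2 < PySem.Str.len p.1) && PySem.Set.contains (PySem.Set.ofList label_in) p.1
      then (p.2, PySem.Str.len p.1) else st)
    = (fun (st : String × Int) (p : String × String) =>
      if label_in.contains p.1 && decide (st.2 < PySem.Str.len p.1)
      then (p.2, PySem.Str.len p.1) else st) := by
    funext st p
    have : PySem.Set.contains (PySem.Set.ofList label_in) p.1 = label_in.contains p.1 := by
      simp [PySem.Set.contains, PySem.Set.mem_ofList]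
    rw [this, Bool.and_comm]
  simp only [hf]
  exact pvMain label_in default label_options [] default (-1) (List.Pairwise.nil) rfl
    (by intro p hp; simp at hp) (Or.inl rfl)
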